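-- pv_equiv track=rewrite | github.com/rustic-ai/kniv-nlp-models | models/kniv-deberta-cascade-large-nlp-en/prepare_srl.py | _get_subtree_span
-- ===== SOURCE A (Python) =====
-- def _get_subtree_span(token_id: int, heads: list[int]) -> tuple[int, int]:
--     """Get contiguous span [start, end) for the dependency subtree rooted at token_id.
--
--     Collects all descendants via BFS, returns min..max+1 indices.
--     """
--     # Build children map
--     children = {i: [] for i in range(len(heads))}
--     for i, h in enumerate(heads):
--         if h >= 0 and h < len(heads) and h != i:
--             children[h].append(i)
--
--     # BFS from token_id
--     visited = {token_id}
--     queue = [token_id]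
--     while queue:
--         node = queue.pop(0)
--         for child in children.get(node, []):
--             if child not in visited:
--                 visited.add(child)
--                 queue.append(child)
--
--     return min(visited), max(visited) + 1
-- ===== SOURCE B (Python) =====
-- def _get_subtree_span(token_id: int, heads: list[int]) -> tuple[int, int]:
--     """Span [start, end) of the subtree rooted at token_id.
--
--     Instead of building a children map and flooding forward with BFS, walk the
--     parent chain upward from each index i; i belongs to the subtree iff the
--     chain reaches token_id.  A chain that reaches token_id does so within
--     len(heads) steps (its intermediate nodes are distinct indices), so the walk
--     is bounded by n steps, which also guards against head cycles.
--     Only the running min/max are kept, never the whole set.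
--     """
--     n = len(heads)
--     lo, hi = token_id, token_id
--     for i in range(n):
--         j = i
--         steps = 0
--         while j != token_id and steps < n:
--             h = heads[j]
--             if 0 <= h < n and h != j:
--                 j = h
--                 steps += 1
--             else:
--                 break
--         if j == token_id:
--             lo = min(lo, i)
--             hi = max(hi, i)
--     return lo, hi + 1
-- ===== Notes on version B (the rewrite author's own statement) =====
-- stated objective: alternative
-- what changed: Replaces the children-map construction plus forward BFS (with a visited set and an O(n) queue.pop(0)) by a per-index backward walk up the parent chain, bounded by n steps to guard cycles, keeping only the running min/max.
import Mathlib
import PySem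

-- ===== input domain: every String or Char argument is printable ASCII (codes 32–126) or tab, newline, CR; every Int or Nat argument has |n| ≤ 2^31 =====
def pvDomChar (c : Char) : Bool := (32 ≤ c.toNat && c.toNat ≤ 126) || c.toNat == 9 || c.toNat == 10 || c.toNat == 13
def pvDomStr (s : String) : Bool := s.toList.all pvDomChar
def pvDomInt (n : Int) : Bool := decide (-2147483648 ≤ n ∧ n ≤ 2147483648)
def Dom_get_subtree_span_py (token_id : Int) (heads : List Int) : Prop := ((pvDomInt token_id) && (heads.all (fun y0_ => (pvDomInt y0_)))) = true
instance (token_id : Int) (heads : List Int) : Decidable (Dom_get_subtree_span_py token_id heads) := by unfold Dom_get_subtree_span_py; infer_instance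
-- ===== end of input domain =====

-- B replaces A's children-map + forward BFS by a backward walk up the parent chain from
-- each index (bounded by n steps), keeping only the running min/max (objective: alternative).

-- ===== PORT A =====
-- the 'while queue:' loop; fuel (len(heads)+1) is an upper bound on the number of pops, proved below
def get_subtree_span_py_bfs (children : PySem.Dict Int (List Int)) :
    Nat → List Int → PySem.Set Int → PySem.Set Int
  | 0, _, visited => visited
  | fuel+1, queue, visited =>
    match queue with
    | [] => visited
    | node :: rest =>
      let st := (children.getD node []).foldl
        (fun (s : PySem.Set Int × List Int) child =>
          if PySem.Set.contains s.1 child then s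
          else (PySem.Set.add s.1 child, s.2 ++ [child])) (visited, rest)
      get_subtree_span_py_bfs children fuel st.2 st.1

def get_subtree_span_py (token_id : Int) (heads : List Int) : List Int :=
  let n : Int := heads.length
  let children0 : PySem.Dict Int (List Int) :=
    (PySem.List.pyRange 0 n 1).foldl (fun d i => d.insert i []) PySem.Dict.empty
  let children : PySem.Dict Int (List Int) :=
    (PySem.List.enumerate heads 0).foldl
      (fun d p => if p.2 ≥ 0 ∧ p.2 < n ∧ p.2 ≠ p.1
                  then d.modify p.2 [] (fun l => l ++ [p.1]) else d) children0
  let visited0 : PySem.Set Int := PySem.Set.ofList [token_id]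
  let visited := get_subtree_span_py_bfs children (heads.length + 1) [token_id] visited0
  match PySem.List.min? visited (fun x => x), PySem.List.max? visited (fun x => x) with
  | some mn, some mx => [mn, mx + 1]
  | _, _ => []

-- ===== PORT B =====
-- the inner 'while' of Source B: at most `fuel` parent steps, stop at token_id or an invalid head
def get_subtree_span_py_walk (token_id : Int) (heads : List Int) : Nat → Int → Int
  | 0, j => j
  | fuel+1, j =>
    if j = token_id then j
    else
      match PySem.List.pyGet? heads j with
      | some h =>
        if 0 ≤ h ∧ h < (heads.length : Int) ∧ h ≠ j then
          get_subtree_span_py_walk token_id heads fuel h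
        else j
      | none => j

def get_subtree_span_py_alt (token_id : Int) (heads : List Int) : List Int :=
  let n : Int := heads.length
  let r := (PySem.List.pyRange 0 n 1).foldl
    (fun (lh : Int × Int) i =>
      if get_subtree_span_py_walk token_id heads heads.length i = token_id
      then (min lh.1 i, max lh.2 i) else lh) (token_id, token_id)
  [r.1, r.2 + 1]

-- ===== PRECONDITION & SPEC =====
def Spec_get_subtree_span_py (token_id : Int) (heads : List Int) (out : List Int) : Prop := out = get_subtree_span_py_alt token_id heads
instance (token_id : Int) (heads : List Int) (out : List Int) : Decidable (Spec_get_subtree_span_py token_id heads out) := by unfold Spec_get_subtree_span_py; infer_instance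

-- ===== CLAIM (what is proved, stated in full; the proofs are below) =====
def Claim_equal_get_subtree_span_py : Prop := ∀ (token_id : Int) (heads : List Int), Dom_get_subtree_span_py token_id heads → Spec_get_subtree_span_py token_id heads (get_subtree_span_py token_id heads)

-- ===== LEMMAS AND PROOFS =====

-- The valid parent of index x (the edge relation both programs traverse)
def pvParent (heads : List Int) (x : Int) : Option Int :=
  if 0 ≤ x ∧ x < (heads.length : Int) then
    match heads[x.toNat]? with
    | some h => if 0 ≤ h ∧ h < (heads.length : Int) ∧ h ≠ x then some h else none
    | none => none
  else none

def pvChain (heads : List Int) : Nat → Int → Option Int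
  | 0, x => some x
  | k+1, x => (pvParent heads x).bind (pvChain heads k)

-- x is in the subtree of token_id: the parent chain from x reaches token_id
def pvReach (token_id : Int) (heads : List Int) (x : Int) : Prop :=
  ∃ k, pvChain heads k x = some token_id

theorem pvParent_ranges {heads : List Int} {x h : Int} (hp : pvParent heads x = some h) :
    0 ≤ x ∧ x < (heads.length : Int) ∧ 0 ≤ h ∧ h < (heads.length : Int) ∧ h ≠ x ∧
      heads[x.toNat]? = some h := by
  unfold pvParent at hp
  by_cases hx : 0 ≤ x ∧ x < (heads.length : Int)
  · rw [if_pos hx] at hp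
    cases hg : heads[x.toNat]? with
    | none => rw [hg] at hp; simp at hp
    | some h' =>
      rw [hg] at hp
      change (if 0 ≤ h' ∧ h' < (heads.length : Int) ∧ h' ≠ x then some h' else none) = some h at hp
      by_cases hcond : 0 ≤ h' ∧ h' < (heads.length : Int) ∧ h' ≠ x
      · rw [if_pos hcond] at hp
        cases Option.some.inj hp
        exact ⟨hx.1, hx.2, hcond.1, hcond.2.1, hcond.2.2, rfl⟩
      · rw [if_neg hcond] at hp; simp at hp
  · rw [if_neg hx] at hp; simp at hp

theorem pvChain_add (heads : List Int) (a b : Nat) (x : Int) :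
    pvChain heads (a + b) x = (pvChain heads a x).bind (pvChain heads b) := by
  induction a generalizing x with
  | zero => simp [pvChain]
  | succ a ih =>
    rw [Nat.succ_add]
    show (pvParent heads x).bind (pvChain heads (a + b)) = _
    cases hp : pvParent heads x with
    | none => simp [pvChain, hp]
    | some y => simp only [Option.bind_some, pvChain, hp, ih]

theorem pvReach_self (token_id : Int) (heads : List Int) : pvReach token_id heads token_id :=
  ⟨0, rfl⟩

theorem pvReach_of_parent {token_id : Int} {heads : List Int} {x h : Int}
    (hp : pvParent heads x = some h) (hr : pvReach token_id heads h) :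
    pvReach token_id heads x := by
  obtain ⟨k, hk⟩ := hr
  exact ⟨k + 1, by simp [pvChain, hp, hk]⟩

theorem pvReach_range {token_id : Int} {heads : List Int} {x : Int}
    (hr : pvReach token_id heads x) :
    x = token_id ∨ (0 ≤ x ∧ x < (heads.length : Int)) := by
  obtain ⟨k, hk⟩ := hr
  cases k with
  | zero => left; exact Option.some.inj hk
  | succ k =>
    cases hp : pvParent heads x with
    | none => rw [show pvChain heads (k+1) x = (pvParent heads x).bind (pvChain heads k) from rfl, hp] at hk; simp at hk
    | some h =>
      right
      obtain ⟨h1, h2, _⟩ := pvParent_ranges hp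
      exact ⟨h1, h2⟩

-- a short witness: if the chain reaches token_id at all, it does within heads.length steps
theorem pvReach_bounded {token_id : Int} {heads : List Int} {x : Int}
    (hr : pvReach token_id heads x) :
    ∃ k ≤ heads.length, pvChain heads k x = some token_id := by
  have hk0 := Nat.find_spec hr
  set k0 := Nat.find hr with hk0def
  have hmed : ∀ m, m < k0 → ∃ y, pvChain heads m x = some y ∧ 0 ≤ y ∧ y < (heads.length : Int) := by
    intro m hm
    have hsplit : pvChain heads k0 x = (pvChain heads m x).bind (pvChain heads (k0 - m)) := by
      rw [← pvChain_add]
      congr 1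
      omega
    cases hy : pvChain heads m x with
    | none => rw [hsplit, hy] at hk0; simp at hk0
    | some y =>
      rw [hsplit, hy, Option.bind_some] at hk0
      refine ⟨y, rfl, ?_⟩
      cases ht : k0 - m with
      | zero => omega
      | succ t =>
        rw [ht] at hk0
        cases hpy : pvParent heads y with
        | none =>
          rw [show pvChain heads (t+1) y = (pvParent heads y).bind (pvChain heads t) from rfl,
            hpy] at hk0
          simp at hk0
        | some z =>
          obtain ⟨hy1, hy2, _⟩ := pvParent_ranges hpy
          exact ⟨hy1, hy2⟩
  have hle : k0 ≤ heads.length := by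
    by_contra hgt
    rw [not_le] at hgt
    have hinj : Set.InjOn (fun m => (pvChain heads m x).getD 0) (Finset.range k0) := by
      have key : ∀ a b, a < b → b < k0 →
          (pvChain heads a x).getD 0 ≠ (pvChain heads b x).getD 0 := by
        intro a b hab hbk
        obtain ⟨ya, hya, _⟩ := hmed a (lt_trans hab hbk)
        obtain ⟨yb, hyb, _⟩ := hmed b hbk
        rw [hya, hyb]
        simp only [Option.getD_some]
        intro heq
        subst heq
        have hsplit : pvChain heads (a + (k0 - b)) x = some token_id := by
          rw [pvChain_add, hya, Option.bind_some]
          have h2 : pvChain heads k0 x = (pvChain heads b x).bind (pvChain heads (k0 - b)) := by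
            rw [← pvChain_add]; congr 1; omega
          rw [h2, hyb, Option.bind_some] at hk0
          exact hk0
        exact absurd hsplit (Nat.find_min hr (by omega))
      intro a ha b hb heq
      simp only [Finset.coe_range, Set.mem_Iio] at ha hb
      rcases lt_trichotomy a b with h | h | h
      · exact absurd heq (key a b h hb)
      · exact h
      · exact absurd heq.symm (key b a h ha)
    have hmaps : ∀ m ∈ Finset.range k0,
        (pvChain heads m x).getD 0 ∈ Finset.Ico (0 : Int) (heads.length : Int) := by
      intro m hm
      rw [Finset.mem_range] at hm
      obtain ⟨y, hy, hy1, hy2⟩ := hmed m hm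
      rw [hy]
      simp only [Option.getD_some, Finset.mem_Ico]
      exact ⟨hy1, hy2⟩
    have hcard := Finset.card_le_card_of_injOn _ hmaps hinj
    rw [Finset.card_range, Int.card_Ico] at hcard
    simp at hcard
    omega
  exact ⟨k0, hle, hk0⟩

-- ## children map characterisation
theorem pvChildren0_getD (heads : List Int) (p : Int) :
    (((PySem.List.pyRange 0 (heads.length : Int) 1).foldl
      (fun d i => d.insert i ([] : List Int)) PySem.Dict.empty).getD p []) = [] := by
  have aux : ∀ (l : List Int) (d : PySem.Dict Int (List Int)),
      (∀ q, d.getD q [] = []) → ∀ q,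
      ((l.foldl (fun d i => d.insert i ([] : List Int)) d).getD q []) = [] := by
    intro l
    induction l with
    | nil => intro d hd q; exact hd q
    | cons x xs ih =>
      intro d hd q
      simp only [List.foldl_cons]
      refine ih _ (fun r => ?_) q
      rw [PySem.Dict.getD_insert]
      split <;> simp [hd r]
  exact aux _ _ (fun q => by simp [PySem.Dict.getD_empty]) p

theorem pvChildren_fold_mem (heads : List Int) (l : List (Int × Int))
    (d : PySem.Dict Int (List Int)) (p c : Int) :
    c ∈ ((l.foldl
      (fun d q => if q.2 ≥ 0 ∧ q.2 < (heads.length : Int) ∧ q.2 ≠ q.1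
                  then d.modify q.2 [] (fun l => l ++ [q.1]) else d) d).getD p []) ↔
      (c ∈ d.getD p [] ∨ ((c, p) ∈ l ∧ 0 ≤ p ∧ p < (heads.length : Int) ∧ p ≠ c)) := by
  induction l generalizing d with
  | nil => simp
  | cons q0 l ih =>
    simp only [List.foldl_cons]
    rw [ih]
    by_cases hcond : q0.2 ≥ 0 ∧ q0.2 < (heads.length : Int) ∧ q0.2 ≠ q0.1
    · rw [if_pos hcond]
      rw [PySem.Dict.getD_modify]
      by_cases hpq : p = q0.2
      · subst hpq
        rw [if_pos rfl]
        simp only [List.mem_append, List.mem_cons, List.not_mem_nil, or_false]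
        obtain ⟨hc1, hc2, hc3⟩ := hcond
        constructor
        · rintro ((h | h) | ⟨h1, h2⟩)
          · exact .inl h
          · exact .inr ⟨.inl (by rw [h]), hc1, hc2, by rw [h]; exact hc3⟩
          · exact .inr ⟨.inr h1, h2⟩
        · rintro (h | ⟨(h0 | h1), h2⟩)
          · exact .inl (.inl h)
          · exact .inl (.inr (congrArg Prod.fst h0))
          · exact .inr ⟨h1, h2⟩
      · rw [if_neg hpq]
        simp only [List.mem_cons]
        constructor
        · rintro (h | ⟨h1, h2⟩)
          · exact .inl h
          · exact .inr ⟨.inr h1, h2⟩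
        · rintro (h | ⟨(h0 | h1), h2⟩)
          · exact .inl h
          · exact absurd (congrArg Prod.snd h0) hpq
          · exact .inr ⟨h1, h2⟩
    · rw [if_neg hcond]
      simp only [List.mem_cons]
      constructor
      · rintro (h | ⟨h1, h2⟩)
        · exact .inl h
        · exact .inr ⟨.inr h1, h2⟩
      · rintro (h | ⟨(h0 | h1), h2⟩)
        · exact .inl h
        · exfalso
          subst h0
          exact hcond ⟨h2.1, h2.2.1, h2.2.2⟩
        · exact .inr ⟨h1, h2⟩

theorem pvChildren_mem (heads : List Int) (p c : Int) :
    c ∈ (((PySem.List.enumerate heads 0).foldl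
      (fun d q => if q.2 ≥ 0 ∧ q.2 < (heads.length : Int) ∧ q.2 ≠ q.1
                  then d.modify q.2 [] (fun l => l ++ [q.1]) else d)
      ((PySem.List.pyRange 0 (heads.length : Int) 1).foldl
        (fun d i => d.insert i ([] : List Int)) PySem.Dict.empty)).getD p []) ↔
    pvParent heads c = some p := by
  rw [pvChildren_fold_mem]
  rw [pvChildren0_getD]
  simp only [List.not_mem_nil, false_or]
  constructor
  · rintro ⟨hmem, hp0, hpl, hpc⟩
    rw [PySem.List.mem_enumerate_iff] at hmem
    obtain ⟨k, hk, hep⟩ := hmem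
    have hc : c = (k : Int) := by simpa using congrArg Prod.fst hep
    have hh : p = heads[k] := congrArg Prod.snd hep
    have hcnat : c.toNat = k := by simp [hc]
    have hrange : 0 ≤ c ∧ c < (heads.length : Int) := by
      subst hc; constructor
      · exact Int.natCast_nonneg k
      · exact_mod_cast hk
    unfold pvParent
    rw [if_pos hrange, hcnat, List.getElem?_eq_getElem hk]
    change (if 0 ≤ heads[k] ∧ heads[k] < (heads.length : Int) ∧ heads[k] ≠ c then
      some heads[k] else none) = some p
    rw [if_pos ⟨hh ▸ hp0, hh ▸ hpl, hh ▸ hpc⟩, hh]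
  · intro hp
    obtain ⟨hc0, hcl, hp0, hpl, hne, hget⟩ := pvParent_ranges hp
    have hk : c.toNat < heads.length := by omega
    refine ⟨?_, hp0, hpl, hne⟩
    rw [PySem.List.mem_enumerate_iff]
    refine ⟨c.toNat, hk, ?_⟩
    have h1 : c = ((0 : Int) + (c.toNat : Int)) := by omega
    have h2 : p = heads[c.toNat] := by
      rw [List.getElem?_eq_getElem hk] at hget
      exact (Option.some.inj hget).symm
    rw [Prod.ext_iff]
    exact ⟨h1, h2⟩

-- ## inner for-loop of the BFS
theorem pvInner_spec (cs : List Int) (vis : PySem.Set Int) (q : List Int) :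
    let st := cs.foldl
      (fun (s : PySem.Set Int × List Int) child =>
        if PySem.Set.contains s.1 child then s
        else (PySem.Set.add s.1 child, s.2 ++ [child])) (vis, q)
    (∀ x, x ∈ st.1 ↔ x ∈ vis ∨ x ∈ cs) ∧
    (∀ x, x ∈ st.2 ↔ x ∈ q ∨ (x ∈ cs ∧ x ∉ vis)) ∧
    (st.1.length + q.length = vis.length + st.2.length) ∧
    (vis.Nodup → st.1.Nodup) := by
  induction cs generalizing vis q with
  | nil =>
    refine ⟨fun x => by simp, fun x => by simp, rfl, fun h => h⟩
  | cons ch cs ih =>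
    simp only [List.foldl_cons]
    by_cases hch : ch ∈ vis
    · have hc : PySem.Set.contains vis ch = true := by
        simp [PySem.Set.contains, hch]
      rw [if_pos hc]
      obtain ⟨a, b, c, d⟩ := ih vis q
      refine ⟨fun x => ?_, fun x => ?_, c, d⟩
      · rw [a x]
        simp only [List.mem_cons]
        constructor
        · rintro (h | h)
          · exact .inl h
          · exact .inr (.inr h)
        · rintro (h | h | h)
          · exact .inl h
          · exact .inl (h ▸ hch)
          · exact .inr h
      · rw [b x]
        simp only [List.mem_cons]
        constructor
        · rintro (h | ⟨h1, h2⟩)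
          · exact .inl h
          · exact .inr ⟨.inr h1, h2⟩
        · rintro (h | ⟨h1 | h1, h2⟩)
          · exact .inl h
          · exact absurd (h1 ▸ hch) h2
          · exact .inr ⟨h1, h2⟩
    · have hc : PySem.Set.contains vis ch = false := by
        simp [PySem.Set.contains, hch]
      rw [if_neg (by rw [hc]; simp)]
      have hadd : PySem.Set.add vis ch = vis ++ [ch] := PySem.Set.add_of_not_mem hch
      rw [hadd]
      obtain ⟨a, b, c, d⟩ := ih (vis ++ [ch]) (q ++ [ch])
      refine ⟨fun x => ?_, fun x => ?_, ?_, fun hnd => ?_⟩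
      · rw [a x]
        simp only [List.mem_append, List.mem_cons]
        tauto
      · rw [b x]
        simp only [List.mem_append, List.mem_cons, List.not_mem_nil, or_false]
        by_cases hxch : x = ch
        · subst hxch
          constructor
          · rintro h; tauto
          · rintro h; tauto
        · constructor
          · rintro (⟨h | h⟩ | ⟨h1, h2⟩)
            · exact .inl h
            · exact absurd h hxch
            · refine .inr ⟨.inr h1, fun hv => h2 (.inl hv)⟩
          · rintro (h | ⟨h1 | h1, h2⟩)
            · exact .inl (.inl h)
            · exact absurd h1 hxch
            · exact .inr ⟨h1, fun hv => (by cases hv with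
                | inl hv => exact h2 hv
                | inr hv => exact hxch hv)⟩
      · have := c
        simp only [List.length_append, List.length_singleton] at this ⊢
        omega
      · refine d ?_
        refine List.Nodup.append hnd (List.nodup_singleton ch) ?_
        intro a ha hb
        cases List.mem_singleton.mp hb
        exact hch ha

theorem pvVisited_length_le {token_id : Int} {heads : List Int} {vis : List Int}
    (hnd : vis.Nodup) (hel : ∀ x ∈ vis, x = token_id ∨ (0 ≤ x ∧ x < (heads.length : Int))) :
    vis.length ≤ heads.length + 1 := by
  have hsub : vis.toFinset ⊆ insert token_id (Finset.Ico (0:Int) (heads.length : Int)) := by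
    intro x hx
    rw [List.mem_toFinset] at hx
    rcases hel x hx with h | h
    · simp [h]
    · simp only [Finset.mem_insert, Finset.mem_Ico]
      exact Or.inr ⟨h.1, h.2⟩
  have h1 : vis.toFinset.card = vis.length := List.toFinset_card_of_nodup hnd
  have h2 := Finset.card_le_card hsub
  have h3 := Finset.card_insert_le token_id (Finset.Ico (0:Int) ((heads.length : Int)))
  have h4 : (Finset.Ico (0:Int) ((heads.length : Int))).card = heads.length := by
    rw [Int.card_Ico]; simp
  omega

-- ## BFS: the final visited set contains token_id, is sound for pvReach, and is parent-closed
theorem pvBfs_spec (token_id : Int) (heads : List Int)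
    (children : PySem.Dict Int (List Int))
    (Hch : ∀ p c, c ∈ children.getD p [] ↔ pvParent heads c = some p) :
    ∀ (fuel : Nat) (queue : List Int) (visited : PySem.Set Int),
    visited.Nodup →
    token_id ∈ visited →
    (∀ x ∈ queue, x ∈ visited) →
    (∀ x ∈ visited, pvReach token_id heads x) →
    (∀ p ∈ visited, p ∉ queue → ∀ c, pvParent heads c = some p → c ∈ visited) →
    (∀ x ∈ visited, x = token_id ∨ (0 ≤ x ∧ x < (heads.length : Int))) →
    (queue.length + (heads.length + 1) ≤ fuel + visited.length) →
    (token_id ∈ get_subtree_span_py_bfs children fuel queue visited ∧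
     (∀ x ∈ get_subtree_span_py_bfs children fuel queue visited, pvReach token_id heads x) ∧
     (∀ p ∈ get_subtree_span_py_bfs children fuel queue visited, ∀ c,
        pvParent heads c = some p → c ∈ get_subtree_span_py_bfs children fuel queue visited)) := by
  intro fuel
  induction fuel with
  | zero =>
    intro queue visited hnd htid hqv hsound hcl hrange hcount
    have hvlen := pvVisited_length_le (token_id := token_id) (heads := heads) hnd hrange
    have hq : queue = [] := by
      cases queue with
      | nil => rfl
      | cons u l => exfalso; simp only [List.length_cons] at hcount; omega
    subst hq
    exact ⟨htid, hsound, fun p hp c hpc => hcl p hp (by simp) c hpc⟩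
  | succ fuel ih =>
    intro queue visited hnd htid hqv hsound hcl hrange hcount
    cases queue with
    | nil =>
      exact ⟨htid, hsound, fun p hp c hpc => hcl p hp (by simp) c hpc⟩
    | cons node rest =>
      have hnodev : node ∈ visited := hqv node (by simp)
      have hinner := pvInner_spec (children.getD node []) visited rest
      obtain ⟨a, b, c, d⟩ := hinner
      have hreduce : get_subtree_span_py_bfs children (fuel+1) (node :: rest) visited =
          get_subtree_span_py_bfs children fuel
            ((children.getD node []).foldl
              (fun (s : PySem.Set Int × List Int) child =>
                if PySem.Set.contains s.1 child then s
                else (PySem.Set.add s.1 child, s.2 ++ [child])) (visited, rest)).2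
            ((children.getD node []).foldl
              (fun (s : PySem.Set Int × List Int) child =>
                if PySem.Set.contains s.1 child then s
                else (PySem.Set.add s.1 child, s.2 ++ [child])) (visited, rest)).1 := rfl
      rw [hreduce]
      apply ih
      · exact d hnd
      · exact (a token_id).2 (Or.inl htid)
      · intro x hx
        rcases (b x).1 hx with h | ⟨h1, _⟩
        · exact (a x).2 (Or.inl (hqv x (List.mem_cons_of_mem _ h)))
        · exact (a x).2 (Or.inr h1)
      · intro x hx
        rcases (a x).1 hx with h | h
        · exact hsound x h
        · exact pvReach_of_parent ((Hch node x).1 h) (hsound node hnodev)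
      · intro p hp hpq cc hpc
        by_cases hpn : p = node
        · subst hpn
          exact (a cc).2 (Or.inr ((Hch p cc).2 hpc))
        · have hpvis : p ∈ visited := by
            rcases (a p).1 hp with h | h
            · exact h
            · by_cases hv : p ∈ visited
              · exact hv
              · exact absurd ((b p).2 (Or.inr ⟨h, hv⟩)) hpq
          have hprest : p ∉ rest := fun hr => hpq ((b p).2 (Or.inl hr))
          have hpold : p ∉ node :: rest := by
            simp only [List.mem_cons]
            rintro (h | h)
            · exact hpn h
            · exact hprest h
          exact (a cc).2 (Or.inl (hcl p hpvis hpold cc hpc))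
      · intro x hx
        rcases (a x).1 hx with h | h
        · exact hrange x h
        · obtain ⟨h1, h2, _⟩ := pvParent_ranges ((Hch node x).1 h)
          exact Or.inr ⟨h1, h2⟩
      · simp only [List.length_cons] at hcount
        omega

theorem pvClosed_complete {token_id : Int} {heads : List Int} {res : List Int}
    (h0 : token_id ∈ res)
    (hcl : ∀ p ∈ res, ∀ c, pvParent heads c = some p → c ∈ res) :
    ∀ x, pvReach token_id heads x → x ∈ res := by
  have key : ∀ (k : Nat) (x : Int), pvChain heads k x = some token_id → x ∈ res := by
    intro k
    induction k with
    | zero => intro x hx; cases hx; exact h0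
    | succ k ih =>
      intro x hx
      cases hp : pvParent heads x with
      | none => rw [show pvChain heads (k+1) x = (pvParent heads x).bind (pvChain heads k) from rfl, hp] at hx; simp at hx
      | some h =>
        rw [show pvChain heads (k+1) x = (pvParent heads x).bind (pvChain heads k) from rfl, hp] at hx
        exact hcl h (ih h hx) x hp
  intro x ⟨k, hk⟩
  exact key k x hk

-- ## the walk of B computes pvReach
theorem pvWalk_tid (token_id : Int) (heads : List Int) (f : Nat) :
    get_subtree_span_py_walk token_id heads f token_id = token_id := by
  cases f with
  | zero => rfl
  | succ f => simp [get_subtree_span_py_walk]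

theorem pvWalk_of_chain {token_id : Int} {heads : List Int} :
    ∀ (k : Nat) (j : Int) (f : Nat), pvChain heads k j = some token_id → k ≤ f →
    get_subtree_span_py_walk token_id heads f j = token_id := by
  intro k
  induction k with
  | zero =>
    intro j f hc _
    cases Option.some.inj hc
    exact pvWalk_tid _ _ _
  | succ k ih =>
    intro j f hc hf
    by_cases hj : j = token_id
    · cases hj; exact pvWalk_tid _ _ _
    · cases hp : pvParent heads j with
      | none =>
        rw [show pvChain heads (k+1) j = (pvParent heads j).bind (pvChain heads k) from rfl, hp] at hc
        simp at hc
      | some h =>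
        rw [show pvChain heads (k+1) j = (pvParent heads j).bind (pvChain heads k) from rfl, hp] at hc
        obtain ⟨hj0, hjl, hh0, hhl, hne, hget⟩ := pvParent_ranges hp
        cases f with
        | zero => omega
        | succ f =>
          have hpy : PySem.List.pyGet? heads j = some h := by
            rw [← Int.toNat_of_nonneg hj0, PySem.List.pyGet?_natCast]; exact hget
          simp only [get_subtree_span_py_walk, if_neg hj, hpy]
          rw [if_pos ⟨hh0, hhl, hne⟩]
          exact ih h f hc (by omega)

theorem pvReach_of_walk {token_id : Int} {heads : List Int} :
    ∀ (f : Nat) (j : Int), 0 ≤ j → j < (heads.length : Int) →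
    get_subtree_span_py_walk token_id heads f j = token_id →
    pvReach token_id heads j := by
  intro f
  induction f with
  | zero =>
    intro j h0 hl hw
    exact hw ▸ pvReach_self _ _
  | succ f ih =>
    intro j h0 hl hw
    by_cases hj : j = token_id
    · exact hj ▸ pvReach_self _ _
    · have hpy : PySem.List.pyGet? heads j = heads[j.toNat]? := by
        conv_lhs => rw [← Int.toNat_of_nonneg h0]
        rw [PySem.List.pyGet?_natCast]
      simp only [get_subtree_span_py_walk, if_neg hj, hpy] at hw
      cases hg : heads[j.toNat]? with
      | none => rw [hg] at hw; simp at hw; exact absurd hw hj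
      | some h =>
        rw [hg] at hw
        change (if 0 ≤ h ∧ h < (heads.length : Int) ∧ h ≠ j then
          get_subtree_span_py_walk token_id heads f h else j) = token_id at hw
        by_cases hcond : 0 ≤ h ∧ h < (heads.length : Int) ∧ h ≠ j
        · rw [if_pos hcond] at hw
          have hr := ih h hcond.1 hcond.2.1 hw
          have hp : pvParent heads j = some h := by
            unfold pvParent
            rw [if_pos ⟨h0, hl⟩, hg]
            change (if 0 ≤ h ∧ h < (heads.length : Int) ∧ h ≠ j then some h else none) = some h
            exact if_pos hcond
          exact pvReach_of_parent hp hr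
        · rw [if_neg hcond] at hw; exact absurd hw hj

-- ## B's fold splits into a filter plus running min/max
theorem pvFold_minmax (p : Int → Prop) [DecidablePred p] (l : List Int) (a b : Int) :
    l.foldl (fun (lh : Int × Int) i => if p i then (min lh.1 i, max lh.2 i) else lh) (a, b) =
    ((l.filter (fun i => decide (p i))).foldl min a,
     (l.filter (fun i => decide (p i))).foldl max b) := by
  induction l generalizing a b with
  | nil => rfl
  | cons x l ih =>
    by_cases hx : p x
    · simp only [List.foldl_cons, if_pos hx, List.filter_cons, decide_eq_true_eq]
      rw [ih]
    · simp only [List.foldl_cons, if_neg hx, List.filter_cons, decide_eq_true_eq]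
      rw [ih]

theorem pvMin?_eq {l : List Int} {m : Int} (hm : m ∈ l) (hle : ∀ y ∈ l, m ≤ y) :
    PySem.List.min? l (fun x => x) = some m := by
  cases hmm : PySem.List.min? l (fun x => x) with
  | none =>
    rw [PySem.List.min?_eq_none_iff] at hmm
    subst hmm; cases hm
  | some m' =>
    have h1 := PySem.List.min?_mem hmm
    have h2 := PySem.List.min?_isMin hmm
    exact congrArg some (le_antisymm (h2 m hm) (hle m' h1))

theorem pvMax?_eq {l : List Int} {m : Int} (hm : m ∈ l) (hle : ∀ y ∈ l, y ≤ m) :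
    PySem.List.max? l (fun x => x) = some m := by
  cases hmm : PySem.List.max? l (fun x => x) with
  | none =>
    rw [PySem.List.max?_eq_none_iff] at hmm
    subst hmm; cases hm
  | some m' =>
    have h1 := PySem.List.max?_mem hmm
    have h2 := PySem.List.max?_isMax hmm
    exact congrArg some (le_antisymm (hle m' h1) (h2 m hm))

-- ===== VERDICT (by name: the statement is the Claim_ definition above) =====
theorem get_subtree_span_py_spec : Claim_equal_get_subtree_span_py := by
  intro token_id heads _
  unfold Spec_get_subtree_span_py
  -- the BFS result and its characterisation
  obtain ⟨htid, hsound, hclosed⟩ :=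
    pvBfs_spec token_id heads
      ((PySem.List.enumerate heads 0).foldl
        (fun d q => if q.2 ≥ 0 ∧ q.2 < (heads.length : Int) ∧ q.2 ≠ q.1
                    then d.modify q.2 [] (fun l => l ++ [q.1]) else d)
        ((PySem.List.pyRange 0 (heads.length : Int) 1).foldl
          (fun d i => d.insert i ([] : List Int)) PySem.Dict.empty))
      (pvChildren_mem heads) (heads.length + 1) [token_id] [token_id]
      (List.nodup_singleton _) (by simp) (fun x hx => by simpa using hx)
      (fun x hx => by cases List.mem_singleton.mp hx; exact pvReach_self _ _)
      (fun p hp hpq => absurd hp hpq)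
      (fun x hx => Or.inl (List.mem_singleton.mp hx))
      (by simp; omega)
  have hmemres : ∀ x, x ∈ get_subtree_span_py_bfs
      ((PySem.List.enumerate heads 0).foldl
        (fun d q => if q.2 ≥ 0 ∧ q.2 < (heads.length : Int) ∧ q.2 ≠ q.1
                    then d.modify q.2 [] (fun l => l ++ [q.1]) else d)
        ((PySem.List.pyRange 0 (heads.length : Int) 1).foldl
          (fun d i => d.insert i ([] : List Int)) PySem.Dict.empty))
      (heads.length + 1) [token_id] [token_id] ↔ pvReach token_id heads x :=
    fun x => ⟨hsound x, pvClosed_complete htid hclosed x⟩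
  -- the filtered index list of B
  have hC : ∀ y, y ∈ token_id :: ((PySem.List.pyRange 0 (heads.length : Int) 1).filter
      (fun i => decide (get_subtree_span_py_walk token_id heads heads.length i = token_id))) ↔
      pvReach token_id heads y := by
    intro y
    constructor
    · intro hy
      rcases List.mem_cons.mp hy with h | h
      · exact h ▸ pvReach_self _ _
      · obtain ⟨h1, h2⟩ := List.mem_filter.mp h
        rw [PySem.List.mem_pyRange_one] at h1
        exact pvReach_of_walk heads.length y h1.1 h1.2 (of_decide_eq_true h2)
    · intro hy
      rcases pvReach_range hy with h | h
      · exact h ▸ List.mem_cons_self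
      · obtain ⟨k, hk, hck⟩ := pvReach_bounded hy
        refine List.mem_cons_of_mem _ (List.mem_filter.mpr ⟨?_, ?_⟩)
        · rw [PySem.List.mem_pyRange_one]; exact h
        · exact decide_eq_true (pvWalk_of_chain k y heads.length hck hk)
    -- min and max agree
  have hmc := PySem.List.min?_id_cons (x := token_id)
      (t := (PySem.List.pyRange 0 (heads.length : Int) 1).filter
        (fun i => decide (get_subtree_span_py_walk token_id heads heads.length i = token_id)))
  have hMc := PySem.List.max?_id_cons (x := token_id)
      (t := (PySem.List.pyRange 0 (heads.length : Int) 1).filter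
        (fun i => decide (get_subtree_span_py_walk token_id heads heads.length i = token_id)))
  have hminres := pvMin?_eq
    ((hmemres _).2 ((hC _).1 (PySem.List.min?_mem hmc)))
    (fun y hy => by
      have := PySem.List.min?_isMin hmc y ((hC y).2 ((hmemres y).1 hy))
      simpa using this)
  have hmaxres := pvMax?_eq
    ((hmemres _).2 ((hC _).1 (PySem.List.max?_mem hMc)))
    (fun y hy => by
      have := PySem.List.max?_isMax hMc y ((hC y).2 ((hmemres y).1 hy))
      simpa using this)
  show get_subtree_span_py token_id heads = _
  simp only [get_subtree_span_py, get_subtree_span_py_alt]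
  rw [show PySem.Set.ofList [token_id] = ([token_id] : PySem.Set Int) from rfl]
  rw [pvFold_minmax (fun i => get_subtree_span_py_walk token_id heads heads.length i = token_id)]
  rw [hminres, hmaxres]
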